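-- pv_equiv track=rewrite | github.com/Artemis21/polybots | ttt/ttt/main/matchmaking.py | _unique_positions_possible
-- ===== SOURCE A (Python) =====
-- def _unique_positions_possible(
--         played_positions: list[list[int]], max_repeats: int = 1) -> bool:
--     """Check if players can play in unique positions."""
--     available_positions = [
--         [pos for pos in range(1, 5) if played.count(pos) < max_repeats]
--         for played in played_positions
--     ]
--     combinations = [[]]
--     for player_positions in available_positions:
--         new_combinations = []
--         for old_combination in combinations:
--             for position in player_positions:
--                 new_combinations.append([*old_combination, position])
--         combinations = new_combinations
--     player_count = len(played_positions)
--     return any(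
--         len(set(combination)) == player_count
--         for combination in combinations
--     )
-- ===== SOURCE B (Python) =====
-- def _unique_positions_possible(
--         played_positions: list[list[int]], max_repeats: int = 1) -> bool:
--     """Check if players can play in unique positions (DFS with a used-set,
--     pruning instead of enumerating all combinations)."""
--     available_positions = [
--         [pos for pos in range(1, 5) if played.count(pos) < max_repeats]
--         for played in played_positions
--     ]
--
--     def solve(index, used):
--         if index == len(available_positions):
--             return True
--         return any(
--             pos not in used and solve(index + 1, used | {pos})
--             for pos in available_positions[index]
--         )
--
--     return solve(0, frozenset())
-- ===== Notes on version B (the rewrite author's own statement) =====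
-- stated objective: faster
-- what changed: A materialises every combination of available positions (product of all availability lists) and then scans them for one without duplicates; B does a depth-first search over players carrying the set of positions already used, pruning duplicate positions immediately, so the search space is bounded by assignments of the at most 4 distinct positions.
import Mathlib
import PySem

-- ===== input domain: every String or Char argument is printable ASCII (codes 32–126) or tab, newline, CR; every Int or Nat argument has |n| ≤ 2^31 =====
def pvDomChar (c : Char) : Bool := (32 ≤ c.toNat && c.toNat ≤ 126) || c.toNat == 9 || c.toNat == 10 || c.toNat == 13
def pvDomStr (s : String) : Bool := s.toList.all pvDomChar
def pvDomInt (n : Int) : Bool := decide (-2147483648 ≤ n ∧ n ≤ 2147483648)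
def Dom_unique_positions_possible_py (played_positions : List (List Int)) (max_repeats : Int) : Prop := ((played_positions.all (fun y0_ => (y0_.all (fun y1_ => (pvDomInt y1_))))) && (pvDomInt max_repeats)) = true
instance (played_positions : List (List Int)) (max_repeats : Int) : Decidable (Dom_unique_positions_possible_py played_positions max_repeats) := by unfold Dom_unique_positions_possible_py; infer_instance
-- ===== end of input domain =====

-- B replaces A's exhaustive enumeration of all position combinations (exponential in the
-- number of players) by a depth-first search carrying the set of used positions, pruning
-- repeated positions immediately; same return value on every input.

-- ===== PORT A =====
def unique_positions_possible_py (played_positions : List (List Int)) (max_repeats : Int) : Bool :=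
  let available_positions := played_positions.map (fun played =>
    (PySem.List.pyRange 1 5 1).filter (fun pos =>
      decide ((PySem.List.count played pos : Int) < max_repeats)))
  let combinations := available_positions.foldl
    (fun combinations player_positions =>
      combinations.foldl
        (fun new_combinations old_combination =>
          player_positions.foldl
            (fun new_combinations position =>
              new_combinations ++ [old_combination ++ [position]])
            new_combinations)
        [])
    [[]]
  let player_count := PySem.List.len played_positions
  combinations.any (fun combination =>
    PySem.Set.len (PySem.Set.ofList combination) == player_count)

-- ===== PORT B =====
-- Python B's inner 'solve(index, used)': structural recursion on the remaining
-- availability lists (index advances through the list), 'used' is the frozenset.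
def uppSolve (avail : List (List Int)) (used : PySem.Set Int) : Bool :=
  match avail with
  | [] => true
  | player_positions :: rest =>
    player_positions.any (fun pos =>
      !(PySem.Set.contains used pos) && uppSolve rest (PySem.Set.add used pos))

def unique_positions_possible_py_alt (played_positions : List (List Int)) (max_repeats : Int) : Bool :=
  let available_positions := played_positions.map (fun played =>
    (PySem.List.pyRange 1 5 1).filter (fun pos =>
      decide ((PySem.List.count played pos : Int) < max_repeats)))
  uppSolve available_positions PySem.Set.empty

-- ===== PRECONDITION & SPEC =====
def Spec_unique_positions_possible_py (played_positions : List (List Int)) (max_repeats : Int) (out : Bool) : Prop := out = unique_positions_possible_py_alt played_positions max_repeats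
instance (played_positions : List (List Int)) (max_repeats : Int) (out : Bool) : Decidable (Spec_unique_positions_possible_py played_positions max_repeats out) := by unfold Spec_unique_positions_possible_py; infer_instance

-- ===== CLAIM (what is proved, stated in full; the proofs are below) =====
def Claim_equal_unique_positions_possible_py : Prop := ∀ (played_positions : List (List Int)) (max_repeats : Int), Dom_unique_positions_possible_py played_positions max_repeats → Spec_unique_positions_possible_py played_positions max_repeats (unique_positions_possible_py played_positions max_repeats)

-- ===== LEMMAS AND PROOFS =====

-- One step of A's combination-building loop is a flatMap.
lemma uppStepA_eq (combos : List (List Int)) (ppos : List Int) :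
    combos.foldl
      (fun new_combinations old_combination =>
        ppos.foldl
          (fun new_combinations position =>
            new_combinations ++ [old_combination ++ [position]])
          new_combinations)
      []
    = combos.flatMap (fun oldc => ppos.map (fun p => oldc ++ [p])) := by
  have h : ∀ (nc : List (List Int)) (oldc : List Int),
      ppos.foldl (fun nc pos => nc ++ [oldc ++ [pos]]) nc
        = nc ++ ppos.map (fun p => oldc ++ [p]) :=
    fun nc oldc => PySem.List.foldl_append_singleton_eq_map _ _ _
  simp only [h]
  simpa using PySem.List.foldl_append_eq_flatMap
    (fun oldc => ppos.map (fun p => oldc ++ [p])) combos []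

-- Membership in A's final combination list.
lemma mem_uppFoldA (L : List (List Int)) : ∀ (combos : List (List Int)) (c : List Int),
    (c ∈ L.foldl
      (fun combinations player_positions =>
        combinations.foldl
          (fun new_combinations old_combination =>
            player_positions.foldl
              (fun new_combinations position =>
                new_combinations ++ [old_combination ++ [position]])
              new_combinations)
          [])
      combos)
    ↔ ∃ c₀ ∈ combos, ∃ t, List.Forall₂ (· ∈ ·) t L ∧ c = c₀ ++ t := by
  induction L with
  | nil =>
    intro combos c
    simp [List.forall₂_nil_right_iff]
  | cons xs rest ih =>
    intro combos c
    rw [List.foldl_cons, uppStepA_eq, ih]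
    constructor
    · rintro ⟨c₀', hc₀', t', ht', rfl⟩
      rcases List.mem_flatMap.mp hc₀' with ⟨c₀, hc₀, hmap⟩
      rcases List.mem_map.mp hmap with ⟨p, hp, rfl⟩
      exact ⟨c₀, hc₀, p :: t', List.Forall₂.cons hp ht', by simp⟩
    · rintro ⟨c₀, hc₀, t, ht, rfl⟩
      rcases List.forall₂_cons_right_iff.mp ht with ⟨p, t', hp, ht', rfl⟩
      refine ⟨c₀ ++ [p], ?_, t', ht', by simp⟩
      exact List.mem_flatMap.mpr ⟨c₀, hc₀, List.mem_map.mpr ⟨p, hp, rfl⟩⟩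

-- The number of distinct elements equals the length exactly on duplicate-free lists.
lemma uppLen_ofList_eq_iff (xs : List Int) :
    (PySem.Set.ofList xs).length = xs.length ↔ xs.Nodup := by
  constructor
  · intro h
    have hsub : PySem.Set.ofList xs ⊆ xs := fun y hy => (PySem.Set.mem_ofList xs y).mp hy
    have hperm : (PySem.Set.ofList xs).Perm xs :=
      ((PySem.Set.nodup_ofList xs).subperm hsub).perm_of_length_le (le_of_eq h.symm)
    exact hperm.nodup_iff.mp (PySem.Set.nodup_ofList xs)
  · intro h
    rw [PySem.Set.ofList_eq_self_of_nodup xs h]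

-- B's DFS succeeds iff a duplicate-free choice avoiding 'used' exists.
lemma uppSolve_iff (L : List (List Int)) : ∀ (used : List Int),
    uppSolve L used = true
    ↔ ∃ t, List.Forall₂ (· ∈ ·) t L ∧ t.Nodup ∧ ∀ p ∈ t, p ∉ used := by
  induction L with
  | nil =>
    intro used
    simp [uppSolve]
  | cons xs rest ih =>
    intro used
    simp only [uppSolve, List.any_eq_true, Bool.and_eq_true, Bool.not_eq_true',
      ih (PySem.Set.add used _)]
    constructor
    · rintro ⟨p, hp, hnot, t', ht', hnd', hfresh⟩
      refine ⟨p :: t', List.Forall₂.cons hp ht', ?_, ?_⟩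
      · refine List.nodup_cons.mpr ⟨fun hmem => ?_, hnd'⟩
        have := hfresh p hmem
        exact this ((PySem.Set.mem_add used p p).mpr (Or.inr rfl))
      · intro q hq
        rcases List.mem_cons.mp hq with rfl | hq'
        · simpa [PySem.Set.contains] using hnot
        · intro hqu
          exact hfresh q hq' ((PySem.Set.mem_add used p q).mpr (Or.inl hqu))
    · rintro ⟨t, ht, hnd, hfresh⟩
      rcases List.forall₂_cons_right_iff.mp ht with ⟨p, t', hp, ht', rfl⟩
      have hnd' := List.nodup_cons.mp hnd
      refine ⟨p, hp, ?_, t', ht', hnd'.2, ?_⟩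
      · simpa [PySem.Set.contains] using hfresh p (List.mem_cons_self ..)
      · intro q hq hmem
        rcases (PySem.Set.mem_add used p q).mp hmem with hqu | rfl
        · exact hfresh q (List.mem_cons_of_mem _ hq) hqu
        · exact hnd'.1 hq

-- ===== VERDICT (by name: the statement is the Claim_ definition above) =====
theorem unique_positions_possible_py_spec : Claim_equal_unique_positions_possible_py := by
  intro pp mr _
  show _ = _
  unfold unique_positions_possible_py unique_positions_possible_py_alt
  set L := pp.map (fun played =>
    (PySem.List.pyRange 1 5 1).filter (fun pos =>
      decide ((PySem.List.count played pos : Int) < mr))) with hL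
  have hlen : L.length = pp.length := by simp [hL]
  rw [Bool.eq_iff_iff]
  simp only [List.any_eq_true, beq_iff_eq]
  rw [show PySem.Set.empty = ([] : List Int) from rfl]
  constructor
  · rintro ⟨c, hc, hcount⟩
    rcases (mem_uppFoldA L [[]] c).mp hc with ⟨c₀, hc₀, t, ht, rfl⟩
    have hc₀e : c₀ = [] := by simpa using hc₀
    subst hc₀e
    simp only [List.nil_append] at hcount ⊢
    have hlt : t.length = pp.length := by rw [ht.length_eq, hlen]
    have hnodup : t.Nodup := by
      apply (uppLen_ofList_eq_iff t).mp
      have : (PySem.Set.len (PySem.Set.ofList t) : Int) = (pp.length : Int) := by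
        simpa [PySem.List.len_eq] using hcount
      simp only [PySem.Set.len] at this
      omega
    exact (uppSolve_iff L []).mpr ⟨t, ht, hnodup, by simp⟩
  · intro hB
    rcases (uppSolve_iff L []).mp hB with ⟨t, ht, hnodup, -⟩
    refine ⟨t, (mem_uppFoldA L [[]] t).mpr ⟨[], by simp, t, ht, by simp⟩, ?_⟩
    have hlt : t.length = pp.length := by rw [ht.length_eq, hlen]
    have := (uppLen_ofList_eq_iff t).mpr hnodup
    simp only [PySem.Set.len, PySem.List.len_eq]
    omega
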